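-- pv_equiv track=rewrite | github.com/BojanUSI/Python-Algorithms | Final/ex1.py | better_algo_x
-- ===== SOURCE A (Python) =====
-- def better_algo_x(A):
--
--     X = [[], [], [], []]
--
--     for i in range(len(A)):
--         X[A[i] % 4].append(A[i])
--
--     for i in range(4):
--         X[i].sort()
--
--     j = 0
--
--     for i in range(4):
--         for x in X[i]:
--             A[j] = x
--             j += 1
--
--     return A
-- ===== SOURCE B (Python) =====
-- def better_algo_x(A):
--     A[:] = sorted(A, key=lambda x: (x % 4, x))
--     return A
-- ===== Notes on version B (the rewrite author's own statement) =====
-- stated objective: simpler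
-- what changed: Replaces the distribute-into-four-buckets loop, the four per-bucket sorts and the nested write-back loops with one stable sort on the composite key (x % 4, x), slice-assigned back into A in place.
import Mathlib
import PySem

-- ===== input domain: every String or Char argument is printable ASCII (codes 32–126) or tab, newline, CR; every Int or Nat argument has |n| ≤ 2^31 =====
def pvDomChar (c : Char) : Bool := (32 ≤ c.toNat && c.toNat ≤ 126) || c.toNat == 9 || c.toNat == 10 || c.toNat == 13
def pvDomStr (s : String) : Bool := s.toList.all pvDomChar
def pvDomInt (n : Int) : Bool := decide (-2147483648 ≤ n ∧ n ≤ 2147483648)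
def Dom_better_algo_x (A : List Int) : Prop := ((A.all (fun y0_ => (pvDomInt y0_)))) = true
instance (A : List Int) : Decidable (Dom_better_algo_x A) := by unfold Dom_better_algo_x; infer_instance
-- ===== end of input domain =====

-- B replaces A's bucket-distribute loop, four per-bucket sorts and nested write-back loops with a
-- single stable sort on the composite key (x % 4, x); both Pythons mutate the argument list in
-- place (A by element writes, B by slice assignment) — the equivalence proved is about the
-- returned value, which is also the final content of the list in both.

-- ===== PORT A =====
def better_algo_x (A : List Int) : List Int :=
  -- X = [[], [], [], []]
  let X0 : List (List Int) := [[], [], [], []]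
  -- for i in range(len(A)): X[A[i] % 4].append(A[i])
  let X1 := (PySem.List.pyRange 0 (PySem.List.len A)).foldl
    (fun X i =>
      let v := PySem.List.pyGetD A i 0
      PySem.List.pySetD X (PySem.Int.mod v 4)
        (PySem.List.pyGetD X (PySem.Int.mod v 4) [] ++ [v])) X0
  -- for i in range(4): X[i].sort()
  let X2 := (PySem.List.pyRange 0 4).foldl
    (fun X i => PySem.List.pySetD X i (PySem.List.sorted (PySem.List.pyGetD X i []) (fun x => x))) X1
  -- j = 0; for i in range(4): for x in X[i]: A[j] = x; j += 1
  ((PySem.List.pyRange 0 4).foldl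
    (fun (p : List Int × Int) i =>
      (PySem.List.pyGetD X2 i []).foldl
        (fun (p : List Int × Int) x => (PySem.List.pySetD p.1 p.2 x, p.2 + 1)) p)
    (A, 0)).1

-- ===== PORT B =====
def better_algo_x_alt (A : List Int) : List Int :=
  -- A[:] = sorted(A, key=lambda x: (x % 4, x)); return A
  PySem.List.sorted2 A (fun x => PySem.Int.mod x 4) (fun x => x)

-- ===== PRECONDITION & SPEC =====
def Spec_better_algo_x (A : List Int) (out : List Int) : Prop := out = better_algo_x_alt A
instance (A : List Int) (out : List Int) : Decidable (Spec_better_algo_x A out) := by unfold Spec_better_algo_x; infer_instance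

-- ===== CLAIM (what is proved, stated in full; the proofs are below) =====
def Claim_equal_better_algo_x : Prop := ∀ (A : List Int), Dom_better_algo_x A → Spec_better_algo_x A (better_algo_x A)

-- ===== LEMMAS AND PROOFS =====

-- the bucket of remainder i (the content of A's X[i] after the first loop)
def pvBkt (i : Int) (A : List Int) : List Int := A.filter (fun x => decide (PySem.Int.mod x 4 = i))

-- single Int key realising the lexicographic order of (x % 4, x) on the domain (2^34 = 17179869184)
def pvK (x : Int) : Int := PySem.Int.mod x 4 * 17179869184 + x

lemma pvK_inj : Function.Injective pvK := by
  intro a b h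
  have ha : PySem.Int.mod a 4 = a % 4 := PySem.Int.mod_eq_emod_of_pos (by norm_num)
  have hb : PySem.Int.mod b 4 = b % 4 := PySem.Int.mod_eq_emod_of_pos (by norm_num)
  simp only [pvK, ha, hb] at h
  obtain ⟨k, hk⟩ : (4:Int) ∣ a - b := ⟨(b % 4 - a % 4) * 4294967296, by linarith⟩
  have hm : a % 4 = b % 4 := by clear h; omega
  rw [hm] at h; linarith

lemma pv_mod4_cases (v : Int) :
    PySem.Int.mod v 4 = 0 ∨ PySem.Int.mod v 4 = 1 ∨ PySem.Int.mod v 4 = 2 ∨ PySem.Int.mod v 4 = 3 := by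
  have h1 := PySem.Int.mod_nonneg v (b := 4) (by norm_num)
  have h2 := PySem.Int.mod_lt v (b := 4) (by norm_num)
  omega

-- first loop of A: distributing into the four buckets
lemma pv_loop1 (A : List Int) : ∀ (l0 l1 l2 l3 : List Int),
    A.foldl (fun X v =>
      PySem.List.pySetD X (PySem.Int.mod v 4)
        (PySem.List.pyGetD X (PySem.Int.mod v 4) [] ++ [v])) [l0, l1, l2, l3]
    = [l0 ++ pvBkt 0 A, l1 ++ pvBkt 1 A, l2 ++ pvBkt 2 A, l3 ++ pvBkt 3 A] := by
  induction A with
  | nil => intro l0 l1 l2 l3; simp [pvBkt]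
  | cons a A ih =>
    intro l0 l1 l2 l3
    rcases pv_mod4_cases a with h | h | h | h
    · rw [List.foldl_cons, h,
        show PySem.List.pySetD [l0,l1,l2,l3] (0:Int) (PySem.List.pyGetD [l0,l1,l2,l3] (0:Int) [] ++ [a]) = [l0 ++ [a],l1,l2,l3] from rfl,
        ih]
      simp only [pvBkt, List.filter_cons]
      rw [PySem.Int.mod_eq_emod_of_pos (by norm_num : (0:Int) < 4)] at h
      simp
      omega
    · rw [List.foldl_cons, h,
        show PySem.List.pySetD [l0,l1,l2,l3] (1:Int) (PySem.List.pyGetD [l0,l1,l2,l3] (1:Int) [] ++ [a]) = [l0,l1 ++ [a],l2,l3] from rfl,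
        ih]
      simp only [pvBkt, List.filter_cons]
      rw [PySem.Int.mod_eq_emod_of_pos (by norm_num : (0:Int) < 4)] at h
      simp
      omega
    · rw [List.foldl_cons, h,
        show PySem.List.pySetD [l0,l1,l2,l3] (2:Int) (PySem.List.pyGetD [l0,l1,l2,l3] (2:Int) [] ++ [a]) = [l0,l1,l2 ++ [a],l3] from rfl,
        ih]
      simp only [pvBkt, List.filter_cons]
      rw [PySem.Int.mod_eq_emod_of_pos (by norm_num : (0:Int) < 4)] at h
      simp
      omega
    · rw [List.foldl_cons, h,
        show PySem.List.pySetD [l0,l1,l2,l3] (3:Int) (PySem.List.pyGetD [l0,l1,l2,l3] (3:Int) [] ++ [a]) = [l0,l1,l2,l3 ++ [a]] from rfl,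
        ih]
      simp only [pvBkt, List.filter_cons]
      rw [PySem.Int.mod_eq_emod_of_pos (by norm_num : (0:Int) < 4)] at h
      simp
      omega

-- the first loop of the port, with its range/index access folded away
lemma pv_X1 (A : List Int) :
    (PySem.List.pyRange 0 (PySem.List.len A)).foldl
      (fun X i =>
        let v := PySem.List.pyGetD A i 0
        PySem.List.pySetD X (PySem.Int.mod v 4)
          (PySem.List.pyGetD X (PySem.Int.mod v 4) [] ++ [v])) [[], [], [], []]
    = [pvBkt 0 A, pvBkt 1 A, pvBkt 2 A, pvBkt 3 A] := by
  rw [PySem.List.foldl_pyRange_pyGetD A 0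
    (fun X v => PySem.List.pySetD X (PySem.Int.mod v 4)
      (PySem.List.pyGetD X (PySem.Int.mod v 4) [] ++ [v])) [[], [], [], []] le_rfl]
  simpa using pv_loop1 A [] [] [] []

lemma pv_take_set (Acc : List Int) (j : Nat) (x : Int) (hj : j < Acc.length) :
    (Acc.set j x).take (j+1) = Acc.take j ++ [x] := by
  rw [List.set_eq_take_append_cons_drop, if_pos hj, List.take_append]
  simp [List.length_take, Nat.min_eq_left hj.le]

-- write-back: folding the element writes of L onto Acc starting at position j
lemma pv_wb (L : List Int) : ∀ (Acc : List Int) (j : Nat), j + L.length ≤ Acc.length →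
    L.foldl (fun (p : List Int × Int) x => (PySem.List.pySetD p.1 p.2 x, p.2 + 1)) (Acc, (j : Int))
    = (Acc.take j ++ L ++ Acc.drop (j + L.length), ((j + L.length : Nat) : Int)) := by
  induction L with
  | nil => intro Acc j h; simp
  | cons x L ih =>
    intro Acc j h
    rw [List.foldl_cons]
    have hstep : (PySem.List.pySetD Acc (j:Int) x, (j:Int) + 1)
        = (Acc.set j x, ((j+1 : Nat) : Int)) := by
      rw [PySem.List.pySetD_of_nonneg _ _ (by positivity)]
      push_cast; simp
    rw [hstep, ih (Acc.set j x) (j+1) (by simp at h ⊢; omega)]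
    have hj : j < Acc.length := by simp at h; omega
    simp only [Prod.mk.injEq]
    refine ⟨?_, by simp; omega⟩
    rw [pv_take_set Acc j x hj, List.drop_set_of_lt (by omega : j < j + 1 + L.length)]
    simp [List.append_assoc]
    congr 1
    omega

lemma pvBkt_cons_eq {a i : Int} (A : List Int) (h : PySem.Int.mod a 4 = i) :
    pvBkt i (a :: A) = a :: pvBkt i A := by
  simp only [pvBkt, List.filter_cons]
  rw [if_pos (decide_eq_true h)]

lemma pvBkt_cons_ne {a i : Int} (A : List Int) (h : PySem.Int.mod a 4 ≠ i) :
    pvBkt i (a :: A) = pvBkt i A := by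
  simp only [pvBkt, List.filter_cons]
  rw [if_neg (fun hc => h (of_decide_eq_true hc))]

-- the four buckets together are a permutation of A
lemma pv_perm (A : List Int) :
    (pvBkt 0 A ++ pvBkt 1 A ++ pvBkt 2 A ++ pvBkt 3 A).Perm A := by
  induction A with
  | nil => simp [pvBkt]
  | cons a A ih =>
    rcases pv_mod4_cases a with h | h | h | h
    · rw [pvBkt_cons_eq A h, pvBkt_cons_ne A (by rw [h]; decide), pvBkt_cons_ne A (by rw [h]; decide),
        pvBkt_cons_ne A (by rw [h]; decide)]
      refine List.Perm.trans ?_ (ih.cons a)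
      simp [List.append_assoc]
    · rw [pvBkt_cons_eq A h, pvBkt_cons_ne A (by rw [h]; decide), pvBkt_cons_ne A (by rw [h]; decide),
        pvBkt_cons_ne A (by rw [h]; decide)]
      refine List.Perm.trans ?_ (ih.cons a)
      simp only [List.append_assoc]
      exact List.perm_middle (a := a) (l₁ := pvBkt 0 A)
        (l₂ := pvBkt 1 A ++ (pvBkt 2 A ++ pvBkt 3 A))
    · rw [pvBkt_cons_eq A h, pvBkt_cons_ne A (by rw [h]; decide), pvBkt_cons_ne A (by rw [h]; decide),
        pvBkt_cons_ne A (by rw [h]; decide)]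
      refine List.Perm.trans ?_ (ih.cons a)
      simpa [List.append_assoc] using
        List.perm_middle (a := a) (l₁ := pvBkt 0 A ++ pvBkt 1 A)
          (l₂ := pvBkt 2 A ++ pvBkt 3 A)
    · rw [pvBkt_cons_eq A h, pvBkt_cons_ne A (by rw [h]; decide), pvBkt_cons_ne A (by rw [h]; decide),
        pvBkt_cons_ne A (by rw [h]; decide)]
      refine List.Perm.trans ?_ (ih.cons a)
      simpa [List.append_assoc] using
        List.perm_middle (a := a) (l₁ := pvBkt 0 A ++ pvBkt 1 A ++ pvBkt 2 A)
          (l₂ := pvBkt 3 A)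

-- sorted2's comparison agrees with the single key pvK on the domain
lemma pv_before_eq (a b : Int) (ha : pvDomInt a = true) (hb : pvDomInt b = true) :
    (decide (PySem.Int.mod a 4 < PySem.Int.mod b 4) ||
      (!decide (PySem.Int.mod b 4 < PySem.Int.mod a 4) && decide (a < b)))
    = decide (pvK a < pvK b) := by
  have e4 : (0:Int) < 4 := by norm_num
  have hma1 := PySem.Int.mod_nonneg a e4
  have hma2 := PySem.Int.mod_lt a e4
  have hmb1 := PySem.Int.mod_nonneg b e4
  have hmb2 := PySem.Int.mod_lt b e4
  simp only [pvDomInt, decide_eq_true_eq] at ha hb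
  simp only [pvK]
  rw [Bool.eq_iff_iff]
  simp only [Bool.or_eq_true, Bool.and_eq_true, Bool.not_eq_true', decide_eq_true_eq,
    decide_eq_false_iff_not]
  omega

lemma pv_insertBy_congr (f g : Int → Int → Bool) (x : Int) : ∀ (acc : List Int),
    (∀ y ∈ acc, f x y = g x y) → PySem.List.insertBy f x acc = PySem.List.insertBy g x acc := by
  intro acc
  induction acc with
  | nil => intro _; rfl
  | cons y ys ih =>
    intro h
    simp only [PySem.List.insertBy]
    rw [h y (by simp)]
    by_cases hg : g x y = true
    · rw [if_pos hg, if_pos hg]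
    · rw [if_neg hg, if_neg hg, ih (fun z hz => h z (by simp [hz]))]

lemma pv_foldl_insert_congr (f g : Int → Int → Bool)
    (hfg : ∀ a b, pvDomInt a = true → pvDomInt b = true → f a b = g a b) :
    ∀ (xs acc : List Int), (∀ x ∈ xs, pvDomInt x = true) → (∀ x ∈ acc, pvDomInt x = true) →
    xs.foldl (fun acc x => PySem.List.insertBy f x acc) acc
      = xs.foldl (fun acc x => PySem.List.insertBy g x acc) acc := by
  intro xs
  induction xs with
  | nil => intro acc _ _; rfl
  | cons x xs ih =>
    intro acc hxs hacc
    simp only [List.foldl_cons]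
    rw [pv_insertBy_congr f g x acc (fun y hy => hfg x y (hxs x (by simp)) (hacc y hy)),
      ih _ (fun z hz => hxs z (by simp [hz]))
        (fun z hz => by
          rcases (PySem.List.mem_insertBy g x z acc).mp hz with h | h
          · exact h ▸ hxs x (by simp)
          · exact hacc z h)]

-- B's sorted2 equals the single-key sort by pvK on the domain
lemma pv_alt_eq_sortedK (A : List Int) (hdom : ∀ x ∈ A, pvDomInt x = true) :
    better_algo_x_alt A = PySem.List.sorted A pvK := by
  rw [show better_algo_x_alt A
      = A.foldl (fun acc x => PySem.List.insertBy
          (fun a b => decide (PySem.Int.mod a 4 < PySem.Int.mod b 4) ||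
            (!decide (PySem.Int.mod b 4 < PySem.Int.mod a 4) && decide (a < b))) x acc) []
    from rfl]
  rw [pv_foldl_insert_congr _ (fun a b => decide (pvK a < pvK b))
    (fun a b ha hb => pv_before_eq a b ha hb) A [] hdom (by simp)]
  rw [PySem.List.sorted_eq_foldl_insertBy A pvK]

lemma pv_mem_bkt {i x : Int} {A : List Int} (hx : x ∈ pvBkt i A) :
    PySem.Int.mod x 4 = i ∧ x ∈ A := by
  have := List.mem_filter.mp hx
  exact ⟨of_decide_eq_true this.2, this.1⟩

-- pvK-comparison of elements of two buckets with remainders i < j, inside the domain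
lemma pv_cross {i j a b : Int} (hij : i < j)
    (hi : PySem.Int.mod a 4 = i) (hj : PySem.Int.mod b 4 = j)
    (ha : pvDomInt a = true) (hb : pvDomInt b = true) : pvK a ≤ pvK b := by
  have e4 : (0:Int) < 4 := by norm_num
  have hma1 := PySem.Int.mod_nonneg a e4
  have hma2 := PySem.Int.mod_lt a e4
  have hmb1 := PySem.Int.mod_nonneg b e4
  have hmb2 := PySem.Int.mod_lt b e4
  simp only [pvDomInt, decide_eq_true_eq] at ha hb
  simp only [pvK, hi, hj] at *
  nlinarith

-- a sorted bucket is pairwise nondecreasing under pvK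
lemma pv_bkt_pairwise (i : Int) (A : List Int) :
    (PySem.List.sorted (pvBkt i A) (fun x => x)).Pairwise (fun a b => pvK a ≤ pvK b) := by
  refine (PySem.List.sorted_pairwise (pvBkt i A) (fun x => x)).imp_of_mem ?_
  intro a b hamem hbmem hab
  have ha := (pv_mem_bkt ((PySem.List.mem_sorted _ _ _ a).mp hamem)).1
  have hb := (pv_mem_bkt ((PySem.List.mem_sorted _ _ _ b).mp hbmem)).1
  simp only [pvK, ha, hb]
  linarith

-- the concatenation of the four sorted buckets is pairwise nondecreasing under pvK
lemma pv_concat_pairwise (A : List Int) (hdom : ∀ x ∈ A, pvDomInt x = true) :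
    (PySem.List.sorted (pvBkt 0 A) (fun x => x) ++ PySem.List.sorted (pvBkt 1 A) (fun x => x) ++
     PySem.List.sorted (pvBkt 2 A) (fun x => x) ++ PySem.List.sorted (pvBkt 3 A) (fun x => x)).Pairwise
      (fun a b => pvK a ≤ pvK b) := by
  have hmem : ∀ (i : Int) (x : Int), x ∈ PySem.List.sorted (pvBkt i A) (fun x => x) →
      PySem.Int.mod x 4 = i ∧ pvDomInt x = true := by
    intro i x hx
    have h := pv_mem_bkt ((PySem.List.mem_sorted _ _ _ x).mp hx)
    exact ⟨h.1, hdom x h.2⟩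
  simp only [List.pairwise_append]
  refine ⟨⟨⟨pv_bkt_pairwise 0 A, pv_bkt_pairwise 1 A, ?_⟩, pv_bkt_pairwise 2 A, ?_⟩,
    pv_bkt_pairwise 3 A, ?_⟩
  · intro a ha b hb
    exact pv_cross (by norm_num) (hmem 0 a ha).1 (hmem 1 b hb).1 (hmem 0 a ha).2 (hmem 1 b hb).2
  · intro a ha b hb
    rcases List.mem_append.mp ha with h | h
    · exact pv_cross (by norm_num) (hmem 0 a h).1 (hmem 2 b hb).1 (hmem 0 a h).2 (hmem 2 b hb).2
    · exact pv_cross (by norm_num) (hmem 1 a h).1 (hmem 2 b hb).1 (hmem 1 a h).2 (hmem 2 b hb).2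
  · intro a ha b hb
    rcases List.mem_append.mp ha with h | h
    · rcases List.mem_append.mp h with h' | h'
      · exact pv_cross (by norm_num) (hmem 0 a h').1 (hmem 3 b hb).1 (hmem 0 a h').2 (hmem 3 b hb).2
      · exact pv_cross (by norm_num) (hmem 1 a h').1 (hmem 3 b hb).1 (hmem 1 a h').2 (hmem 3 b hb).2
    · exact pv_cross (by norm_num) (hmem 2 a h).1 (hmem 3 b hb).1 (hmem 2 a h).2 (hmem 3 b hb).2

-- the concatenation of the four sorted buckets is a permutation of A
lemma pv_concat_perm (A : List Int) :
    (PySem.List.sorted (pvBkt 0 A) (fun x => x) ++ PySem.List.sorted (pvBkt 1 A) (fun x => x) ++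
     PySem.List.sorted (pvBkt 2 A) (fun x => x) ++ PySem.List.sorted (pvBkt 3 A) (fun x => x)).Perm A := by
  refine List.Perm.trans ?_ (pv_perm A)
  exact ((((PySem.List.sorted_perm (pvBkt 0 A) (fun x => x) false).append
    (PySem.List.sorted_perm (pvBkt 1 A) (fun x => x) false)).append
    (PySem.List.sorted_perm (pvBkt 2 A) (fun x => x) false)).append
    (PySem.List.sorted_perm (pvBkt 3 A) (fun x => x) false))

-- A's port computes the concatenation of the four sorted buckets
lemma pv_portA (A : List Int) :
    better_algo_x A =
      PySem.List.sorted (pvBkt 0 A) (fun x => x) ++ PySem.List.sorted (pvBkt 1 A) (fun x => x) ++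
      PySem.List.sorted (pvBkt 2 A) (fun x => x) ++ PySem.List.sorted (pvBkt 3 A) (fun x => x) := by
  simp only [better_algo_x]
  rw [pv_X1 A]
  set s0 := PySem.List.sorted (pvBkt 0 A) (fun x => x)
  set s1 := PySem.List.sorted (pvBkt 1 A) (fun x => x)
  set s2 := PySem.List.sorted (pvBkt 2 A) (fun x => x)
  set s3 := PySem.List.sorted (pvBkt 3 A) (fun x => x)
  have hwb : ((PySem.List.pyRange 0 4).foldl
      (fun (p : List Int × Int) i =>
        (PySem.List.pyGetD [s0, s1, s2, s3] i []).foldl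
          (fun (p : List Int × Int) x => (PySem.List.pySetD p.1 p.2 x, p.2 + 1)) p)
      (A, 0))
      = ((s0 ++ s1 ++ s2 ++ s3).foldl
          (fun (p : List Int × Int) x => (PySem.List.pySetD p.1 p.2 x, p.2 + 1)) (A, 0)) := by
    simp [List.foldl_append]
    rfl
  have hlen : (s0 ++ s1 ++ s2 ++ s3).length = A.length :=
    (pv_concat_perm A).length_eq
  calc ((PySem.List.pyRange 0 4).foldl
      (fun (p : List Int × Int) i =>
        (PySem.List.pyGetD [s0, s1, s2, s3] i []).foldl
          (fun (p : List Int × Int) x => (PySem.List.pySetD p.1 p.2 x, p.2 + 1)) p)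
      (A, (0:Int))).1
      = ((s0 ++ s1 ++ s2 ++ s3).foldl
          (fun (p : List Int × Int) x => (PySem.List.pySetD p.1 p.2 x, p.2 + 1))
          (A, ((0:Nat):Int))).1 := by rw [hwb]; norm_num
    _ = s0 ++ s1 ++ s2 ++ s3 := by
          rw [pv_wb (s0 ++ s1 ++ s2 ++ s3) A 0 (by have h := hlen; simp only [List.length_append] at h ⊢; omega)]
          simp [List.append_assoc]
          have h := hlen
          simp only [List.length_append] at h
          omega

-- ===== VERDICT (by name: the statement is the Claim_ definition above) =====
theorem better_algo_x_spec : Claim_equal_better_algo_x := by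
  intro A hA
  have hdom : ∀ x ∈ A, pvDomInt x = true := by
    unfold Dom_better_algo_x at hA
    simpa [List.all_eq_true] using hA
  show better_algo_x A = better_algo_x_alt A
  rw [pv_portA A, pv_alt_eq_sortedK A hdom]
  exact PySem.List.eq_of_perm_of_pairwise_le_of_injective pvK pvK_inj
    ((pv_concat_perm A).trans (PySem.List.sorted_perm A pvK false).symm)
    (pv_concat_pairwise A hdom)
    (PySem.List.sorted_pairwise A pvK)
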